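-- pv_equiv track=rewrite | github.com/remusezequiel/Lic.-Ciencia-de-Datos | Algoritmos_Y_Estructuras_De_Datos/aed_1/Parciales/Segundo Parcial/python-recu-tn/solucion.py | es_valle
-- ===== SOURCE A (Python) =====
-- def es_valle (f:list[int])  -> bool:
--     if len(f) < 3:
--         return False
--
--     i:int = 1
--
--     # Verifico que exista la parte decreciente
--     while i < len(f) and f[i] < f[i - 1]:
--         i += 1
--
--     # Si no avanzó i, entonces no hay parte decreciente
--     # or Si llegué al final, no habrá parte creciente
--     if i == 1 or i == len(f):
--         return False
--
--     # Verifico que exista la parte creciente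
--     while i < len(f) and f[i] > f[i - 1]:
--         i += 1
--
--     # es valle si llegamos al final creciendo
--     return i == len(f)
-- ===== SOURCE B (Python) =====
-- def es_valle(f: list[int]) -> bool:
--     # Locate the valley bottom as the (first) index of the minimum, then
--     # validate the two arms independently.
--     if len(f) < 3:
--         return False
--     m = f.index(min(f))
--     if m == 0 or m == len(f) - 1:
--         return False
--     dec = all(f[k] < f[k - 1] for k in range(1, m + 1))
--     inc = all(f[k] > f[k - 1] for k in range(m + 1, len(f)))
--     return dec and inc
-- ===== Notes on version B (the rewrite author's own statement) =====
-- stated objective: alternative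
-- what changed: Instead of A's single forward scan that follows the slope until it flips, B locates the valley bottom as the first index of the minimum and then validates the decreasing prefix and increasing suffix as two independent passes.
import Mathlib
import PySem

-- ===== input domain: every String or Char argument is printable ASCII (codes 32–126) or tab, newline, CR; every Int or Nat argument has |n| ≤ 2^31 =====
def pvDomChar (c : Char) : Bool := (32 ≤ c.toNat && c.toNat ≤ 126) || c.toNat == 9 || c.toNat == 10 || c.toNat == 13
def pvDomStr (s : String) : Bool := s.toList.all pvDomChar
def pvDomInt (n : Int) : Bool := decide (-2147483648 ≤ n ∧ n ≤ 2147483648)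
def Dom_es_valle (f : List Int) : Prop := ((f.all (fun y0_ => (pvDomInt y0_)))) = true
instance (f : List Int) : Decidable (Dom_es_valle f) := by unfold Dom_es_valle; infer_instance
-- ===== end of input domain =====

-- B finds the valley bottom as the first index of the minimum and checks the two arms
-- in two independent passes, instead of A's single scan that follows the slope until it flips.

-- ===== PORT A =====
-- first while loop: advance i while f[i] < f[i-1]; i stays ≥ 1, indices in range (i < len),
-- so f[i] is ported as f.getD i 0 (exact on in-range indices)
def esValleDec (f : List Int) (i : Nat) : Nat :=
  if h : i < f.length ∧ f.getD i 0 < f.getD (i - 1) 0 then esValleDec f (i + 1) else i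
termination_by f.length - i
decreasing_by omega

-- second while loop: advance i while f[i] > f[i-1]
def esValleInc (f : List Int) (i : Nat) : Nat :=
  if h : i < f.length ∧ f.getD i 0 > f.getD (i - 1) 0 then esValleInc f (i + 1) else i
termination_by f.length - i
decreasing_by omega

def es_valle (f : List Int) : Bool :=
  if f.length < 3 then false
  else
    let i := esValleDec f 1
    if i = 1 ∨ i = f.length then false
    else decide (esValleInc f i = f.length)

-- ===== PORT B =====
-- min(f) raises only on empty f, excluded by the len < 3 guard; the `none` matches only
-- make the same computation total. Indices produced by range are nonnegative and in range.
def es_valle_alt (f : List Int) : Bool :=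
  if f.length < 3 then false
  else
    match PySem.List.min? f (fun x => x) with
    | none => false
    | some v =>
      match PySem.List.index? f v with
      | none => false
      | some m =>
        if m = 0 ∨ m = f.length - 1 then false
        else
          ((PySem.List.pyRange 1 ((m : Int) + 1) 1).all
              (fun k => decide (PySem.List.pyGetD f k 0 < PySem.List.pyGetD f (k - 1) 0))) &&
          ((PySem.List.pyRange ((m : Int) + 1) (f.length : Int) 1).all
              (fun k => decide (PySem.List.pyGetD f k 0 > PySem.List.pyGetD f (k - 1) 0)))

-- ===== PRECONDITION & SPEC =====
def Spec_es_valle (f : List Int) (out : Bool) : Prop := out = es_valle_alt f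
instance (f : List Int) (out : Bool) : Decidable (Spec_es_valle f out) := by unfold Spec_es_valle; infer_instance

-- ===== CLAIM (what is proved, stated in full; the proofs are below) =====
def Claim_equal_es_valle : Prop := ∀ (f : List Int), Dom_es_valle f → Spec_es_valle f (es_valle f)

-- ===== LEMMAS AND PROOFS =====

-- valley shape with bottom at index m
def Valley (f : List Int) (m : Nat) : Prop :=
  0 < m ∧ m + 1 < f.length ∧
  (∀ k, 1 ≤ k → k ≤ m → f.getD k 0 < f.getD (k - 1) 0) ∧
  (∀ k, m < k → k < f.length → f.getD k 0 > f.getD (k - 1) 0)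

theorem esValleDec_spec (f : List Int) (i : Nat) (hle : i ≤ f.length) :
    i ≤ esValleDec f i ∧ esValleDec f i ≤ f.length ∧
    (∀ k, i ≤ k → k < esValleDec f i → f.getD k 0 < f.getD (k - 1) 0) ∧
    (esValleDec f i < f.length → ¬ f.getD (esValleDec f i) 0 < f.getD (esValleDec f i - 1) 0) := by
  have main : ∀ n i, i ≤ f.length → f.length - i ≤ n →
      i ≤ esValleDec f i ∧ esValleDec f i ≤ f.length ∧
      (∀ k, i ≤ k → k < esValleDec f i → f.getD k 0 < f.getD (k - 1) 0) ∧
      (esValleDec f i < f.length → ¬ f.getD (esValleDec f i) 0 < f.getD (esValleDec f i - 1) 0) := by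
    intro n
    induction n with
    | zero =>
      intro i hle hn
      have hi : i = f.length := by omega
      rw [esValleDec]
      have hc : ¬ (i < f.length ∧ f.getD i 0 < f.getD (i - 1) 0) := by
        rintro ⟨h1, _⟩; omega
      rw [dif_neg hc]
      refine ⟨le_refl _, hle, ?_, ?_⟩
      · intro k hk1 hk2; omega
      · intro h; omega
    | succ n ih =>
      intro i hle hn
      rw [esValleDec]
      by_cases hc : i < f.length ∧ f.getD i 0 < f.getD (i - 1) 0
      · rw [dif_pos hc]
        obtain ⟨h1, h2, h3, h4⟩ := ih (i + 1) (by omega) (by omega)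
        refine ⟨by omega, h2, ?_, h4⟩
        intro k hk1 hk2
        rcases Nat.eq_or_lt_of_le hk1 with h | h
        · rw [← h]; exact hc.2
        · exact h3 k h hk2
      · rw [dif_neg hc]
        refine ⟨le_refl _, hle, ?_, ?_⟩
        · intro k hk1 hk2; omega
        · intro h hlt
          exact hc ⟨h, hlt⟩
  exact main (f.length - i) i hle (le_refl _)

theorem esValleInc_spec (f : List Int) (i : Nat) (hle : i ≤ f.length) :
    i ≤ esValleInc f i ∧ esValleInc f i ≤ f.length ∧
    (∀ k, i ≤ k → k < esValleInc f i → f.getD k 0 > f.getD (k - 1) 0) ∧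
    (esValleInc f i < f.length → ¬ f.getD (esValleInc f i) 0 > f.getD (esValleInc f i - 1) 0) := by
  have main : ∀ n i, i ≤ f.length → f.length - i ≤ n →
      i ≤ esValleInc f i ∧ esValleInc f i ≤ f.length ∧
      (∀ k, i ≤ k → k < esValleInc f i → f.getD k 0 > f.getD (k - 1) 0) ∧
      (esValleInc f i < f.length → ¬ f.getD (esValleInc f i) 0 > f.getD (esValleInc f i - 1) 0) := by
    intro n
    induction n with
    | zero =>
      intro i hle hn
      have hi : i = f.length := by omega
      rw [esValleInc]
      have hc : ¬ (i < f.length ∧ f.getD i 0 > f.getD (i - 1) 0) := by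
        rintro ⟨h1, _⟩; omega
      rw [dif_neg hc]
      refine ⟨le_refl _, hle, ?_, ?_⟩
      · intro k hk1 hk2; omega
      · intro h; omega
    | succ n ih =>
      intro i hle hn
      rw [esValleInc]
      by_cases hc : i < f.length ∧ f.getD i 0 > f.getD (i - 1) 0
      · rw [dif_pos hc]
        obtain ⟨h1, h2, h3, h4⟩ := ih (i + 1) (by omega) (by omega)
        refine ⟨by omega, h2, ?_, h4⟩
        intro k hk1 hk2
        rcases Nat.eq_or_lt_of_le hk1 with h | h
        · rw [← h]; exact hc.2
        · exact h3 k h hk2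
      · rw [dif_neg hc]
        refine ⟨le_refl _, hle, ?_, ?_⟩
        · intro k hk1 hk2; omega
        · intro h hlt; exact hc ⟨h, hlt⟩
  exact main (f.length - i) i hle (le_refl _)

theorem esValleDec_eq (f : List Int) (i j : Nat) (hij : i ≤ j) (hj : j ≤ f.length)
    (hdec : ∀ k, i ≤ k → k < j → f.getD k 0 < f.getD (k - 1) 0)
    (hstop : j < f.length → ¬ f.getD j 0 < f.getD (j - 1) 0) :
    esValleDec f i = j := by
  have main : ∀ n i, i ≤ j → j - i ≤ n →
      (∀ k, i ≤ k → k < j → f.getD k 0 < f.getD (k - 1) 0) → esValleDec f i = j := by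
    intro n
    induction n with
    | zero =>
      intro i hij hn hdec
      have hi : i = j := by omega
      subst hi
      rw [esValleDec]
      have hc : ¬ (i < f.length ∧ f.getD i 0 < f.getD (i - 1) 0) := by
        rintro ⟨h1, h2⟩; exact hstop h1 h2
      rw [dif_neg hc]
    | succ n ih =>
      intro i hij hn hdec
      rcases Nat.eq_or_lt_of_le hij with h | h
      · subst h
        rw [esValleDec]
        have hc : ¬ (i < f.length ∧ f.getD i 0 < f.getD (i - 1) 0) := by
          rintro ⟨h1, h2⟩; exact hstop h1 h2
        rw [dif_neg hc]
      · rw [esValleDec]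
        have hc : i < f.length ∧ f.getD i 0 < f.getD (i - 1) 0 :=
          ⟨by omega, hdec i (le_refl _) h⟩
        rw [dif_pos hc]
        exact ih (i + 1) (by omega) (by omega) (fun k hk1 hk2 => hdec k (by omega) hk2)
  exact main (j - i) i hij (le_refl _) hdec

theorem esValleInc_eq (f : List Int) (i j : Nat) (hij : i ≤ j) (hj : j ≤ f.length)
    (hinc : ∀ k, i ≤ k → k < j → f.getD k 0 > f.getD (k - 1) 0)
    (hstop : j < f.length → ¬ f.getD j 0 > f.getD (j - 1) 0) :
    esValleInc f i = j := by
  have main : ∀ n i, i ≤ j → j - i ≤ n →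
      (∀ k, i ≤ k → k < j → f.getD k 0 > f.getD (k - 1) 0) → esValleInc f i = j := by
    intro n
    induction n with
    | zero =>
      intro i hij hn hinc
      have hi : i = j := by omega
      subst hi
      rw [esValleInc]
      have hc : ¬ (i < f.length ∧ f.getD i 0 > f.getD (i - 1) 0) := by
        rintro ⟨h1, h2⟩; exact hstop h1 h2
      rw [dif_neg hc]
    | succ n ih =>
      intro i hij hn hinc
      rcases Nat.eq_or_lt_of_le hij with h | h
      · subst h
        rw [esValleInc]
        have hc : ¬ (i < f.length ∧ f.getD i 0 > f.getD (i - 1) 0) := by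
          rintro ⟨h1, h2⟩; exact hstop h1 h2
        rw [dif_neg hc]
      · rw [esValleInc]
        have hc : i < f.length ∧ f.getD i 0 > f.getD (i - 1) 0 :=
          ⟨by omega, hinc i (le_refl _) h⟩
        rw [dif_pos hc]
        exact ih (i + 1) (by omega) (by omega) (fun k hk1 hk2 => hinc k (by omega) hk2)
  exact main (j - i) i hij (le_refl _) hinc

theorem valley_of_A (f : List Int) (h : es_valle f = true) :
    3 ≤ f.length ∧ Valley f (esValleDec f 1 - 1) := by
  unfold es_valle at h
  by_cases h3 : f.length < 3
  · rw [if_pos h3] at h; cases h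
  rw [if_neg h3] at h
  simp only at h
  by_cases hg : esValleDec f 1 = 1 ∨ esValleDec f 1 = f.length
  · rw [if_pos hg] at h; cases h
  rw [if_neg hg] at h
  have hinc : esValleInc f (esValleDec f 1) = f.length := by
    exact of_decide_eq_true h
  push Not at hg
  obtain ⟨hd1, hd2, hd3, _⟩ := esValleDec_spec f 1 (by omega)
  set j := esValleDec f 1 with hj
  obtain ⟨_, _, hi3, _⟩ := esValleInc_spec f j (by omega)
  rw [hinc] at hi3
  refine ⟨by omega, by omega, by omega, ?_, ?_⟩
  · intro k hk1 hk2
    exact hd3 k hk1 (by omega)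
  · intro k hk1 hk2
    exact hi3 k (by omega) hk2

theorem A_of_valley (f : List Int) (m : Nat) (h3 : 3 ≤ f.length) (hv : Valley f m) :
    es_valle f = true := by
  obtain ⟨hm0, hm1, hdec, hinc⟩ := hv
  have hDec : esValleDec f 1 = m + 1 := by
    apply esValleDec_eq f 1 (m + 1) (by omega) (by omega)
    · intro k hk1 hk2; exact hdec k hk1 (by omega)
    · intro hlt hcon
      have := hinc (m + 1) (by omega) hlt
      omega
  have hInc : esValleInc f (m + 1) = f.length := by
    apply esValleInc_eq f (m + 1) f.length (by omega) (le_refl _)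
    · intro k hk1 hk2; exact hinc k (by omega) hk2
    · intro hlt; omega
  unfold es_valle
  rw [if_neg (by omega)]
  simp only [hDec]
  rw [if_neg (by omega : ¬ (m + 1 = 1 ∨ m + 1 = f.length))]
  rw [hInc]
  simp

-- strictly decreasing arm: transitive chain
theorem chain_dec (f : List Int) (m : Nat)
    (hd : ∀ k, 1 ≤ k → k ≤ m → f.getD k 0 < f.getD (k - 1) 0) :
    ∀ p q, p < q → q ≤ m → f.getD q 0 < f.getD p 0 := by
  intro p q
  induction q with
  | zero => intro h1 h2; omega
  | succ q ih =>
    intro h1 h2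
    have hstep : f.getD (q + 1) 0 < f.getD q 0 := by
      have := hd (q + 1) (by omega) h2
      simpa using this
    rcases Nat.lt_or_ge p q with h | h
    · exact lt_trans hstep (ih h (by omega))
    · have : p = q := by omega
      rw [this]; exact hstep

-- strictly increasing arm: transitive chain
theorem chain_inc (f : List Int) (m : Nat)
    (hi : ∀ k, m < k → k < f.length → f.getD k 0 > f.getD (k - 1) 0) :
    ∀ p q, m ≤ p → p < q → q < f.length → f.getD p 0 < f.getD q 0 := by
  intro p q
  induction q with
  | zero => intro h1 h2 h3; omega
  | succ q ih =>
    intro h1 h2 h3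
    have hstep : f.getD q 0 < f.getD (q + 1) 0 := by
      have := hi (q + 1) (by omega) h3
      simpa using this
    rcases Nat.lt_or_ge p q with h | h
    · exact lt_trans (ih h1 h (by omega)) hstep
    · have : p = q := by omega
      rw [this]; exact hstep

theorem valley_strict_min (f : List Int) (m : Nat) (hv : Valley f m) :
    ∀ k, k < f.length → k ≠ m → f.getD m 0 < f.getD k 0 := by
  obtain ⟨hm0, hm1, hdec, hinc⟩ := hv
  intro k hk hne
  rcases Nat.lt_or_ge k m with h | h
  · exact chain_dec f m hdec k m h (le_refl _)
  · exact chain_inc f m hinc m k (le_refl _) (by omega) hk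

theorem valley_min_eq (f : List Int) (m : Nat) (h3 : 3 ≤ f.length) (hv : Valley f m)
    (hm : m < f.length) :
    PySem.List.min? f (fun x => x) = some (f.getD m 0) := by
  have hne : f ≠ [] := by
    intro h; rw [h] at h3; simp at h3
  cases hmin : PySem.List.min? f (fun x => x) with
  | none => exact absurd ((PySem.List.min?_eq_none_iff f _).mp hmin) hne
  | some v =>
    have hvmem : v ∈ f := PySem.List.min?_mem hmin
    have hvmin : ∀ y ∈ f, v ≤ y := PySem.List.min?_isMin hmin
    obtain ⟨k, hk, hkv⟩ := List.mem_iff_getElem.mp hvmem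
    have hgd : f.getD k 0 = v := by rw [List.getD_eq_getElem f 0 hk, hkv]
    by_cases hkm : k = m
    · rw [hkm] at hgd; rw [hgd]
    · exfalso
      have h1 : f.getD m 0 < v := by
        rw [← hgd]; exact valley_strict_min f m hv k hk hkm
      have h2 : v ≤ f.getD m 0 := by
        have hmem : f.getD m 0 ∈ f := by
          rw [List.getD_eq_getElem f 0 hm]; exact List.getElem_mem hm
        exact hvmin _ hmem
      omega

theorem valley_index_eq (f : List Int) (m : Nat) (hv : Valley f m) (hm : m < f.length) :
    PySem.List.index? f (f.getD m 0) = some m := by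
  rw [PySem.List.index?_eq_some_iff]
  refine ⟨f.take m, f.drop (m + 1), ?_, ?_, ?_⟩
  · conv_lhs => rw [← List.take_append_drop m f]
    rw [List.drop_eq_getElem_cons hm, List.getD_eq_getElem f 0 hm]
  · rw [List.length_take]; omega
  · intro hmem
    obtain ⟨j, hj, hjv⟩ := List.mem_iff_getElem.mp hmem
    rw [List.getElem_take] at hjv
    have hjm : j < m := by
      rw [List.length_take] at hj; omega
    have : f.getD m 0 < f.getD j 0 :=
      valley_strict_min f m hv j (by omega) (by omega)
    rw [List.getD_eq_getElem f 0 (by omega : j < f.length)] at this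
    omega

theorem B_of_valley (f : List Int) (m : Nat) (h3 : 3 ≤ f.length) (hv : Valley f m) :
    es_valle_alt f = true := by
  have hm : m < f.length := by obtain ⟨_, h, _, _⟩ := hv; omega
  unfold es_valle_alt
  rw [if_neg (by omega)]
  rw [valley_min_eq f m h3 hv hm]
  dsimp only
  rw [valley_index_eq f m hv hm]
  dsimp only
  obtain ⟨hm0, hm1, hdec, hinc⟩ := hv
  rw [if_neg (by omega : ¬ (m = 0 ∨ m = f.length - 1))]
  rw [Bool.and_eq_true]
  constructor
  · rw [List.all_eq_true]
    intro k hk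
    rw [PySem.List.mem_pyRange_one] at hk
    obtain ⟨n, rfl⟩ : ∃ n : Nat, k = (n : Int) :=
      ⟨k.toNat, (Int.toNat_of_nonneg (by omega)).symm⟩
    have hn1 : 1 ≤ n := by omega
    have hnm : n ≤ m := by omega
    have hcast : ((n : Int) - 1) = ((n - 1 : Nat) : Int) := by omega
    rw [hcast, PySem.List.pyGetD_natCast, PySem.List.pyGetD_natCast]
    simpa using hdec n hn1 hnm
  · rw [List.all_eq_true]
    intro k hk
    rw [PySem.List.mem_pyRange_one] at hk
    obtain ⟨n, rfl⟩ : ∃ n : Nat, k = (n : Int) :=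
      ⟨k.toNat, (Int.toNat_of_nonneg (by omega)).symm⟩
    have hn1 : m < n := by omega
    have hnm : n < f.length := by omega
    have hcast : ((n : Int) - 1) = ((n - 1 : Nat) : Int) := by omega
    rw [hcast, PySem.List.pyGetD_natCast, PySem.List.pyGetD_natCast]
    simpa using hinc n hn1 hnm

theorem valley_of_B (f : List Int) (h : es_valle_alt f = true) :
    ∃ m, 3 ≤ f.length ∧ Valley f m := by
  unfold es_valle_alt at h
  by_cases h3 : f.length < 3
  · rw [if_pos h3] at h; cases h
  rw [if_neg h3] at h
  cases hmin : PySem.List.min? f (fun x => x) with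
  | none => rw [hmin] at h; cases h
  | some v =>
  rw [hmin] at h
  dsimp only at h
  cases hidx : PySem.List.index? f v with
  | none => rw [hidx] at h; cases h
  | some m =>
  rw [hidx] at h
  dsimp only at h
  by_cases hg : m = 0 ∨ m = f.length - 1
  · rw [if_pos hg] at h; cases h
  rw [if_neg hg] at h
  rw [Bool.and_eq_true, List.all_eq_true, List.all_eq_true] at h
  obtain ⟨hall1, hall2⟩ := h
  obtain ⟨hmlt, _, _⟩ := PySem.List.getElem_of_index?_eq_some hidx
  push Not at hg
  refine ⟨m, by omega, by omega, by omega, ?_, ?_⟩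
  · intro k hk1 hk2
    have := hall1 (k : Int) (by rw [PySem.List.mem_pyRange_one]; omega)
    have hcast : ((k : Int) - 1) = ((k - 1 : Nat) : Int) := by omega
    rw [hcast, PySem.List.pyGetD_natCast, PySem.List.pyGetD_natCast] at this
    simpa using this
  · intro k hk1 hk2
    have := hall2 (k : Int) (by rw [PySem.List.mem_pyRange_one]; omega)
    have hcast : ((k : Int) - 1) = ((k - 1 : Nat) : Int) := by omega
    rw [hcast, PySem.List.pyGetD_natCast, PySem.List.pyGetD_natCast] at this
    simpa using this

-- ===== VERDICT (by name: the statement is the Claim_ definition above) =====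
theorem es_valle_spec : Claim_equal_es_valle := by
  intro f _
  unfold Spec_es_valle
  cases hA : es_valle f with
  | true =>
    obtain ⟨h3, hv⟩ := valley_of_A f hA
    exact (B_of_valley f _ h3 hv).symm
  | false =>
    cases hB : es_valle_alt f with
    | true =>
      obtain ⟨m, h3, hv⟩ := valley_of_B f hB
      rw [A_of_valley f m h3 hv] at hA; exact Bool.noConfusion hA
    | false => rfl
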